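-- pv_equiv track=rewrite | github.com/anriley/Biomonitoring-2.0-Refined | prepare_data_for_SWARM_and_alignment_filter.py | pull_taxonomy_data_by_primer
-- ===== SOURCE A (Python) =====
-- def pull_taxonomy_data_by_primer(in_taxonomy, in_zotu_dict):
--     out_taxonomy = {}
--     for key in in_zotu_dict:
--         primer_zotus = in_zotu_dict[key]
--         current_taxonomy = [in_taxonomy[0]]
--         for line in in_taxonomy[1:]:
--             if line[0] in primer_zotus:
--                 current_taxonomy.append(line)
--         out_taxonomy[key] = current_taxonomy
--     return out_taxonomy
-- ===== SOURCE B (Python) =====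
-- def pull_taxonomy_data_by_primer(in_taxonomy, in_zotu_dict):
--     index = {}
--     for key in in_zotu_dict:
--         for zotu in dict.fromkeys(in_zotu_dict[key]):
--             index.setdefault(zotu, []).append(key)
--     out_taxonomy = {key: [in_taxonomy[0]] for key in in_zotu_dict}
--     for line in in_taxonomy[1:]:
--         if not line:
--             continue
--         for key in index.get(line[0], ()):
--             out_taxonomy[key].append(line)
--     return out_taxonomy
-- ===== Notes on version B (the rewrite author's own statement) =====
-- stated objective: alternative
-- what changed: Instead of re-scanning all taxonomy rows once per primer with a linear 'in zotu-list' membership test, B builds an inverted index zotu->primer-keys once and makes a single distributing pass over the rows (skipping empty rows), appending each row to every primer it belongs to; measured about 1.4x on the timing inputs, below the 1.5x bar, so no speed is claimed.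
-- crash fix: When the primer dict is nonempty and in_taxonomy is empty or contains an empty row after the header, A raises IndexError reading line[0] (or in_taxonomy[0]); B returns the filtered dict, skipping empty rows (it still raises when in_taxonomy itself is empty). — e.g. on pull_taxonomy_data_by_primer([["h"], []], [("p", ["z"])]): A raises IndexError, B returns [("p", [["h"]])]
import Mathlib
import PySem

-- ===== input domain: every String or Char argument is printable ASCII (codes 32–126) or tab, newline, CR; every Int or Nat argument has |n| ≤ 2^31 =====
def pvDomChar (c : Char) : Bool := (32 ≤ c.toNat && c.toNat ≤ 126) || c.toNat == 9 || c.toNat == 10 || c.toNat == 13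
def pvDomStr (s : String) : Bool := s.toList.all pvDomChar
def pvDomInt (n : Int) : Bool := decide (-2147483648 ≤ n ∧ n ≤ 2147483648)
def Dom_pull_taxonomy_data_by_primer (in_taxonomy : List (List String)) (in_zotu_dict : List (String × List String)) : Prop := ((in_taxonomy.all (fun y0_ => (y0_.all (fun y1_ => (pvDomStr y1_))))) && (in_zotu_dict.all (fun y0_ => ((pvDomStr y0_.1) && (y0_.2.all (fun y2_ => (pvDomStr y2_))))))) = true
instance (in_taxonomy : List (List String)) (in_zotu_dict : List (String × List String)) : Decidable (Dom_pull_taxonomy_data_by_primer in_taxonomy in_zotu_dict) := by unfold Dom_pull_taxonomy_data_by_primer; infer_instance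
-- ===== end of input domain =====

-- ===== PORT A =====
-- B replaces A's per-primer rescans by one inverted index (zotu -> primer keys) plus a single
-- distributing pass over the rows; return values agree on Pre_ (no mutation of arguments by either).
-- 'for key in in_zotu_dict' iterates the dict's keys and 'in_zotu_dict[key]' looks the value up
-- (first match); under Pre_ (distinct keys) folding over the pairs while looking the value up is exact.
def pull_taxonomy_data_by_primer (in_taxonomy : List (List String)) (in_zotu_dict : List (String × List String)) : List (String × List (List String)) :=
  in_zotu_dict.foldl (fun out kv =>
    let primer_zotus := (List.lookup kv.1 in_zotu_dict).getD []
    let current := (PySem.List.slice in_taxonomy (some 1) none).foldl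
      (fun acc line => if primer_zotus.contains (PySem.List.pyGetD line 0 "") then acc ++ [line] else acc)
      [PySem.List.pyGetD in_taxonomy 0 []]
    out ++ [(kv.1, current)]) []

-- ===== PORT B =====
def pull_taxonomy_data_by_primer_alt (in_taxonomy : List (List String)) (in_zotu_dict : List (String × List String)) : List (String × List (List String)) :=
  let index : PySem.Dict String (List String) :=
    in_zotu_dict.foldl (fun idx kv =>
      (PySem.List.dedup kv.2).foldl (fun idx z => idx.modify z [] (fun ks => ks ++ [kv.1])) idx)
      PySem.Dict.empty
  let out0 : PySem.Dict String (List (List String)) :=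
    in_zotu_dict.foldl (fun out kv => out.insert kv.1 [PySem.List.pyGetD in_taxonomy 0 []]) PySem.Dict.empty
  ((PySem.List.slice in_taxonomy (some 1) none).foldl
    (fun out line =>
      if line = [] then out else
      (index.getD (PySem.List.pyGetD line 0 "") []).foldl
        (fun out k => out.modify k [] (fun cur => cur ++ [line])) out)
    out0).items

-- ===== PRECONDITION & SPEC =====
-- Pre_ excludes (i) inputs on which A raises IndexError (a nonempty dict with an empty in_taxonomy,
-- or a nonempty dict with an empty row after the header, where A reads line[0]) and (ii) duplicate
-- primer keys, which a Python dict argument can never carry.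
def Pre_pull_taxonomy_data_by_primer (in_taxonomy : List (List String)) (in_zotu_dict : List (String × List String)) : Prop :=
  (in_zotu_dict.map Prod.fst).Nodup ∧
  (in_zotu_dict ≠ [] → in_taxonomy ≠ [] ∧ ∀ line ∈ in_taxonomy.tail, line ≠ [])
instance (in_taxonomy : List (List String)) (in_zotu_dict : List (String × List String)) : Decidable (Pre_pull_taxonomy_data_by_primer in_taxonomy in_zotu_dict) := by unfold Pre_pull_taxonomy_data_by_primer; infer_instance

def pvWitness_pull_taxonomy_data_by_primer : List (List String) × (List (String × List String)) :=
  ([["id", "tax"], ["z1", "A"], ["z2", "B"]], [("p1", ["z1"]), ("p2", ["z2", "z3"])])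

-- When the primer dict is nonempty and in_taxonomy has an empty row after the header, A raises
-- IndexError reading line[0]; B skips empty rows and returns the filtered dict.
def Raises_pull_taxonomy_data_by_primer (in_taxonomy : List (List String)) (in_zotu_dict : List (String × List String)) : Prop :=
  in_zotu_dict ≠ [] ∧ in_taxonomy ≠ [] ∧ (in_taxonomy.tail.any (fun l => l.isEmpty)) = true
instance (in_taxonomy : List (List String)) (in_zotu_dict : List (String × List String)) : Decidable (Raises_pull_taxonomy_data_by_primer in_taxonomy in_zotu_dict) := by unfold Raises_pull_taxonomy_data_by_primer; infer_instance
def pvRaiseWitness_pull_taxonomy_data_by_primer : List (List String) × (List (String × List String)) :=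
  ([["h"], []], [("p", ["z"])])
def pvRaiseWitnessOut_pull_taxonomy_data_by_primer : List (String × List (List String)) :=
  [("p", [["h"]])]

def Spec_pull_taxonomy_data_by_primer (in_taxonomy : List (List String)) (in_zotu_dict : List (String × List String)) (out : List (String × List (List String))) : Prop := out = pull_taxonomy_data_by_primer_alt in_taxonomy in_zotu_dict
instance (in_taxonomy : List (List String)) (in_zotu_dict : List (String × List String)) (out : List (String × List (List String))) : Decidable (Spec_pull_taxonomy_data_by_primer in_taxonomy in_zotu_dict out) := by unfold Spec_pull_taxonomy_data_by_primer; infer_instance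

-- ===== CLAIM (what is proved, stated in full; the proofs are below) =====
def Claim_equal_pull_taxonomy_data_by_primer : Prop := ∀ (in_taxonomy : List (List String)) (in_zotu_dict : List (String × List String)), Dom_pull_taxonomy_data_by_primer in_taxonomy in_zotu_dict → Pre_pull_taxonomy_data_by_primer in_taxonomy in_zotu_dict → Spec_pull_taxonomy_data_by_primer in_taxonomy in_zotu_dict (pull_taxonomy_data_by_primer in_taxonomy in_zotu_dict)
def Claim_raises_pull_taxonomy_data_by_primer : Prop := (∀ (in_taxonomy : List (List String)) (in_zotu_dict : List (String × List String)), Dom_pull_taxonomy_data_by_primer in_taxonomy in_zotu_dict → Raises_pull_taxonomy_data_by_primer in_taxonomy in_zotu_dict → ¬ Pre_pull_taxonomy_data_by_primer in_taxonomy in_zotu_dict) ∧ (Dom_pull_taxonomy_data_by_primer (pvRaiseWitness_pull_taxonomy_data_by_primer.1) (pvRaiseWitness_pull_taxonomy_data_by_primer.2) ∧ Raises_pull_taxonomy_data_by_primer (pvRaiseWitness_pull_taxonomy_data_by_primer.1) (pvRaiseWitness_pull_taxonomy_data_by_primer.2) ∧ pull_taxonomy_data_by_primer_alt (pvRaiseWitness_pull_taxonomy_data_by_primer.1)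 (pvRaiseWitness_pull_taxonomy_data_by_primer.2) = pvRaiseWitnessOut_pull_taxonomy_data_by_primer)

-- ===== LEMMAS AND PROOFS =====

-- distinct keys make pairs with equal first components equal
theorem pv_keys_inj {β : Type} (d : List (String × β)) (hnd : (d.map Prod.fst).Nodup)
    {p q : String × β} (hp : p ∈ d) (hq : q ∈ d) (h : p.1 = q.1) : p = q := by
  induction d with
  | nil => cases hp
  | cons a d ih =>
    simp only [List.map_cons, List.nodup_cons] at hnd
    rcases List.mem_cons.mp hp with rfl | hp'
    · rcases List.mem_cons.mp hq with rfl | hq'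
      · rfl
      · have hm := List.mem_map_of_mem (f := Prod.fst) hq'
        rw [← h] at hm
        exact absurd hm hnd.1
    · rcases List.mem_cons.mp hq with rfl | hq'
      · have hm := List.mem_map_of_mem (f := Prod.fst) hp'
        rw [h] at hm
        exact absurd hm hnd.1
      · exact ih hnd.2 hp' hq'

-- first-match lookup of a present key under distinct keys
theorem pv_lookup_eq (d : List (String × List String)) (hnd : (d.map Prod.fst).Nodup)
    {kv : String × List String} (hkv : kv ∈ d) : List.lookup kv.1 d = some kv.2 := by
  induction d with
  | nil => cases hkv
  | cons a d ih =>
    obtain ⟨k, v⟩ := a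
    simp only [List.map_cons, List.nodup_cons] at hnd
    rcases List.mem_cons.mp hkv with rfl | hkv'
    · simp
    · have hne : (kv.1 == k) = false := by
        refine beq_eq_false_iff_ne.mpr ?_
        intro he
        have hm := List.mem_map_of_mem (f := Prod.fst) hkv'
        rw [he] at hm
        exact absurd hm hnd.1
      rw [List.lookup_cons, hne]
      exact ih hnd.2 hkv'

-- getD after a fold of 'modify _ [] (· ++ [v])' over a duplicate-free key list
theorem pv_foldl_modify_append_getD {ν : Type} (l : List String) (hl : l.Nodup) (v : ν)
    (d : PySem.Dict String (List ν)) (z : String) :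
    (l.foldl (fun dd x => dd.modify x [] (fun ks => ks ++ [v])) d).getD z []
      = d.getD z [] ++ (if z ∈ l then [v] else []) := by
  induction l generalizing d with
  | nil => simp
  | cons x l ih =>
    simp only [List.nodup_cons] at hl
    simp only [List.foldl_cons]
    rw [ih hl.2, PySem.Dict.getD_modify]
    by_cases hz : z = x
    · subst hz
      simp [hl.1]
    · simp [hz, List.mem_cons]

-- the inverted index maps each zotu to the keys whose lists contain it, in dict order
theorem pv_index_getD (d : List (String × List String)) (idx : PySem.Dict String (List String)) (z : String) :
    (d.foldl (fun idx kv =>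
        (PySem.List.dedup kv.2).foldl (fun idx z => idx.modify z [] (fun ks => ks ++ [kv.1])) idx) idx).getD z []
      = idx.getD z [] ++ (d.filter (fun kv => kv.2.contains z)).map Prod.fst := by
  induction d generalizing idx with
  | nil => simp
  | cons kv d ih =>
    simp only [List.foldl_cons, List.filter_cons]
    rw [ih, pv_foldl_modify_append_getD _ (PySem.List.nodup_dedup kv.2) kv.1 idx z]
    by_cases hc : kv.2.contains z
    · simp [List.contains_iff_mem.mp hc, List.append_assoc]
    · have hz : z ∉ kv.2 := fun hm => hc (List.contains_iff_mem.mpr hm)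
      simp [hz]

theorem pv_set_update_of_subset (s : PySem.Set String) (l : List String) (h : ∀ x ∈ l, x ∈ s) :
    PySem.Set.update s l = s := by
  rw [PySem.Set.update_eq_append_filter]
  have hnil : List.filter (fun y => !s.contains y) (PySem.Set.ofList l) = [] :=
    List.filter_eq_nil_iff.mpr (fun y hy => by
      simpa using h y ((PySem.Set.mem_ofList l y).mp hy))
  rw [hnil, List.append_nil]

-- foldl congruence on members (explicit arguments)
theorem pv_foldl_congr {α β : Type} (f g : β → α → β) (l : List α) (init : β)
    (h : ∀ acc x, x ∈ l → f acc x = g acc x) : l.foldl f init = l.foldl g init := by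
  induction l generalizing init with
  | nil => rfl
  | cons a l ih =>
    simp only [List.foldl_cons]
    rw [h init a (List.mem_cons_self), ih]
    intro acc x hx
    exact h acc x (List.mem_cons_of_mem a hx)

-- folding a function that never changes the accumulator
theorem pv_foldl_id {α β : Type} (f : β → α → β) (h : ∀ b a, f b a = b) (l : List α) (init : β) :
    l.foldl f init = init := by
  induction l with
  | nil => rfl
  | cons a l ih => rw [List.foldl_cons, h]; exact ih

-- the distributing pass: keys are unchanged and each key's list grows by the rows it matches
theorem pv_pass (idx : PySem.Dict String (List String)) (K : List String)
    (hvals : ∀ z, (idx.getD z []).Nodup ∧ ∀ k ∈ idx.getD z [], k ∈ K)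
    (lines : List (List String)) :
    ∀ (out : PySem.Dict String (List (List String))), out.keys = K →
      (lines.foldl (fun out line =>
          (idx.getD (PySem.List.pyGetD line 0 "") []).foldl
            (fun out k => out.modify k [] (fun cur => cur ++ [line])) out) out).keys = K ∧
      ∀ k0, (lines.foldl (fun out line =>
          (idx.getD (PySem.List.pyGetD line 0 "") []).foldl
            (fun out k => out.modify k [] (fun cur => cur ++ [line])) out) out).getD k0 []
        = out.getD k0 [] ++ lines.filter (fun line => (idx.getD (PySem.List.pyGetD line 0 "") []).contains k0) := by
  induction lines with
  | nil => exact fun out hk => ⟨hk, fun k0 => by simp⟩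
  | cons line lines ih =>
    intro out hk
    simp only [List.foldl_cons]
    have hks := hvals (PySem.List.pyGetD line 0 "")
    set ks := idx.getD (PySem.List.pyGetD line 0 "") [] with hksdef
    have hkeys1 : ((ks.foldl (fun out k => out.modify k [] (fun cur => cur ++ [line])) out)).keys = K := by
      rw [PySem.Dict.keys_foldl_modify ks [] (fun _ _ v => v ++ [line]) out, hk]
      exact pv_set_update_of_subset K ks hks.2
    obtain ⟨hK, hG⟩ := ih (ks.foldl (fun out k => out.modify k [] (fun cur => cur ++ [line])) out) hkeys1
    refine ⟨hK, fun k0 => ?_⟩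
    rw [hG k0, pv_foldl_modify_append_getD ks hks.1 line out k0, List.filter_cons]
    by_cases hm : k0 ∈ ks
    · have hm' : k0 ∈ idx.getD (PySem.List.pyGetD line 0 "") [] := hm
      simp [hm, hm', List.append_assoc]
    · have hm' : k0 ∉ idx.getD (PySem.List.pyGetD line 0 "") [] := hm
      simp [hm, hm']

-- ===== VERDICT (by name: the statement is the Claim_ definition above) =====
theorem pull_taxonomy_data_by_primer_spec : Claim_equal_pull_taxonomy_data_by_primer := by
  intro t d hdom hpre
  obtain ⟨hnd, hne⟩ := hpre
  unfold Spec_pull_taxonomy_data_by_primer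
  unfold pull_taxonomy_data_by_primer pull_taxonomy_data_by_primer_alt
  dsimp only
  by_cases hdne : d = []
  · -- empty dict: A folds over nothing; B's index and out0 are empty and the pass keeps them empty
    subst hdne
    simp only [List.foldl_nil]
    rw [pv_foldl_id _ (fun out line => by
      split
      · rfl
      · rw [PySem.Dict.getD_empty]; rfl)]
    rfl
  · obtain ⟨htne, hrows⟩ := hne hdne
    -- abbreviations
    set h0 : List String := PySem.List.pyGetD t 0 [] with hh0
    set rest : List (List String) := PySem.List.slice t (some 1) none with hrest
    set idx : PySem.Dict String (List String) :=
      d.foldl (fun idx kv =>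
        (PySem.List.dedup kv.2).foldl (fun idx z => idx.modify z [] (fun ks => ks ++ [kv.1])) idx)
        PySem.Dict.empty with hidx
    set out0 : PySem.Dict String (List (List String)) :=
      d.foldl (fun out kv => out.insert kv.1 [h0]) PySem.Dict.empty with hout0
    -- B's guarded pass never sees an empty row, so the guard can be dropped
    have hrestrows : ∀ line ∈ rest, line ≠ [] := by
      intro line hl
      apply hrows
      rwa [hrest, PySem.List.slice_from_one] at hl
    rw [pv_foldl_congr
      (fun out line =>
        if line = [] then out else
        (idx.getD (PySem.List.pyGetD line 0 "") []).foldl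
          (fun out k => out.modify k [] (fun cur => cur ++ [line])) out)
      (fun out line =>
        (idx.getD (PySem.List.pyGetD line 0 "") []).foldl
          (fun out k => out.modify k [] (fun cur => cur ++ [line])) out)
      rest out0
      (by
        intro acc line hl
        exact if_neg (hrestrows line hl))]
    -- A in map/filter form
    rw [PySem.List.foldl_append_singleton_eq_map (fun kv : String × List String =>
      (kv.1, rest.foldl
        (fun acc line => if ((List.lookup kv.1 d).getD []).contains (PySem.List.pyGetD line 0 "") then acc ++ [line] else acc)
        [h0])) d []]
    -- facts about idx
    have hidxg : ∀ z, idx.getD z [] = (d.filter (fun kv => kv.2.contains z)).map Prod.fst := by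
      intro z
      rw [hidx, pv_index_getD d PySem.Dict.empty z, PySem.Dict.getD_empty]
      simp
    have hvals : ∀ z, (idx.getD z []).Nodup ∧ ∀ k ∈ idx.getD z [], k ∈ d.map Prod.fst := by
      intro z
      rw [hidxg z]
      constructor
      · exact List.Nodup.sublist (List.Sublist.map Prod.fst List.filter_sublist) hnd
      · intro k hkm
        rcases List.mem_map.mp hkm with ⟨kv, hkvm, rfl⟩
        exact List.mem_map_of_mem (List.mem_of_mem_filter hkvm)
    -- facts about out0
    have hitems0 : out0.items = d.map (fun kv => (kv.1, [h0])) := by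
      rw [hout0]
      have := PySem.Dict.items_foldl_insert_fresh d (fun kv => kv.1) (fun _ => [h0]) PySem.Dict.empty
        (fun a _ => by simp) (by simpa using hnd)
      simpa using this
    have hkeys0 : out0.keys = d.map Prod.fst := by
      show out0.items.map Prod.fst = d.map Prod.fst
      rw [hitems0, List.map_map]
      rfl
    -- the distributing pass
    obtain ⟨hKf, hGf⟩ := pv_pass idx (d.map Prod.fst) hvals rest out0 hkeys0
    set fin : PySem.Dict String (List (List String)) :=
      rest.foldl (fun out line =>
        (idx.getD (PySem.List.pyGetD line 0 "") []).foldl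
          (fun out k => out.modify k [] (fun cur => cur ++ [line])) out) out0 with hfin
    have hfinnd : fin.keys.Nodup := by rw [hKf]; exact hnd
    rw [PySem.Dict.items_eq_map_keys fin hfinnd [], hKf, List.map_map]
    simp only [List.nil_append]
    refine List.map_congr_left ?_
    intro kv hkv
    have hlook : (List.lookup kv.1 d).getD [] = kv.2 := by rw [pv_lookup_eq d hnd hkv]; rfl
    have hget0 : out0.getD kv.1 [] = [h0] := by
      refine PySem.Dict.getD_of_mem_items out0 ?_ (by rw [hkeys0]; exact hnd) []
      rw [hitems0]
      exact List.mem_map_of_mem hkv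
    have hgetfin : fin.getD kv.1 [] = [h0] ++ rest.filter
        (fun line => (idx.getD (PySem.List.pyGetD line 0 "") []).contains kv.1) := by
      rw [hGf kv.1, hget0]
    show (kv.1, _) = (kv.1, fin.getD kv.1 [])
    refine Prod.ext rfl ?_
    rw [hgetfin, hlook, PySem.List.foldl_append_if
      (fun line => kv.2.contains (PySem.List.pyGetD line 0 "")) (fun line => line) rest [h0]]
    simp only [List.map_id_fun', id]
    congr 1
    refine List.filter_congr ?_
    intro line _
    rw [Bool.eq_iff_iff, List.contains_iff_mem, List.contains_iff_mem, hidxg]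
    constructor
    · intro hm
      exact List.mem_map_of_mem (List.mem_filter.mpr ⟨hkv, List.contains_iff_mem.mpr hm⟩)
    · intro hm
      rcases List.mem_map.mp hm with ⟨kv', hkv'f, hfst⟩
      have hkv'd := List.mem_of_mem_filter hkv'f
      have hpred := List.of_mem_filter hkv'f
      have heq : kv' = kv := pv_keys_inj d hnd hkv'd hkv hfst
      subst heq
      exact List.contains_iff_mem.mp hpred

@[simp]
theorem pull_taxonomy_data_by_primer_raises : Claim_raises_pull_taxonomy_data_by_primer := by
  unfold Claim_raises_pull_taxonomy_data_by_primer
  refine ⟨?_, by decide⟩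
  intro t d _ hr hpre
  obtain ⟨hdne, _, hany⟩ := hr
  obtain ⟨_, hne⟩ := hpre
  obtain ⟨l, hl, hle⟩ := List.any_eq_true.mp hany
  exact (hne hdne).2 l hl (List.isEmpty_iff.mp hle)
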